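-- pv_equiv track=rewrite | github.com/cjh28/pdf-to-anki | exporters.py | escape_csv_content
-- ===== SOURCE A (Python) =====
-- def escape_csv_content(content: str) -> str:
--     """
--     转义CSV特殊字符，确保符合RFC 4180标准
--
--     RFC 4180规定：
--     - 如果字段包含逗号、双引号或换行符，整个字段需要用双引号包围
--     - 字段内的双引号需要用两个双引号转义
--
--     Args:
--         content: 原始内容
--
--     Returns:
--         str: 转义后的内容
--
--     需求：4.5
--     """
--     if content is None:
--         return ""
--
--     # 检查是否需要转义
--     needs_quoting = any(char in content for char in [',', '"', '\n', '\r'])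
--
--     if needs_quoting:
--         # 先转义双引号（双引号变成两个双引号）
--         escaped = content.replace('"', '""')
--         # 用双引号包围整个字段
--         return f'"{escaped}"'
--
--     return content
-- ===== SOURCE B (Python) =====
-- def escape_csv_content(content: str) -> str:
--     """Single-pass variant: build the escaped buffer and detect the need for
--     quoting in one loop instead of a membership scan plus str.replace."""
--     if content is None:
--         return ""
--     buf = []
--     needs_quoting = False
--     for ch in content:
--         if ch == '"':
--             buf.append('""')
--             needs_quoting = True
--         else:
--             buf.append(ch)
--             if ch == ',' or ch == '\n' or ch == '\r':
--                 needs_quoting = True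
--     if needs_quoting:
--         return '"' + ''.join(buf) + '"'
--     return content
-- ===== Notes on version B (the rewrite author's own statement) =====
-- stated objective: alternative
-- what changed: Replaces the two-phase scan (an any() membership test over the special characters followed by str.replace and wrapping) with a single pass that simultaneously builds the quote-doubled buffer and sets a needs_quoting flag, returning the original string when no quoting is needed.
import Mathlib
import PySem

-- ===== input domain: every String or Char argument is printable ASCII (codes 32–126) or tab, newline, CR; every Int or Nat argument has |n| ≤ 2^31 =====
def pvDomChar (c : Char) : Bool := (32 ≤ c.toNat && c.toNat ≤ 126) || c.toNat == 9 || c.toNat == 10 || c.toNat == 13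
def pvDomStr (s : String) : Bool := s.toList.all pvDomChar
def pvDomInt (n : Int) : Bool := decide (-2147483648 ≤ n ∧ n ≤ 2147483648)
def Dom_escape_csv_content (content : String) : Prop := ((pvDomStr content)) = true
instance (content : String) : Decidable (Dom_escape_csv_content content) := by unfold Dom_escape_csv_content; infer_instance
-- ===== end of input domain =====

-- B replaces A's membership-test-then-replace phases by one pass that builds the
-- escaped buffer and the needs_quoting flag together (objective: alternative).
-- The 'content is None' guard of the Python is unreachable for a String argument.

-- ===== PORT A =====
def escape_csv_content (content : String) : String :=
  let needs_quoting := ([",", "\"", "\n", "\r"] : List String).any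
      (fun ch => PySem.Str.isIn ch content)
  if needs_quoting then
    let escaped := PySem.Str.replace content "\"" "\"\""
    String.mk ('"' :: escaped.toList ++ ['"'])
  else
    content

-- ===== PORT B =====
def escape_csv_content_alt (content : String) : String :=
  let st := content.toList.foldl
    (fun (acc : List Char × Bool) ch =>
      if ch = '"' then (acc.1 ++ ['"', '"'], true)
      else (acc.1 ++ [ch], acc.2 || (ch = ',' || ch = '\n' || ch = '\r')))
    ([], false)
  if st.2 then String.mk ('"' :: st.1 ++ ['"']) else content

-- ===== PRECONDITION & SPEC =====
def Spec_escape_csv_content (content : String) (out : String) : Prop := out = escape_csv_content_alt content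
instance (content : String) (out : String) : Decidable (Spec_escape_csv_content content out) := by unfold Spec_escape_csv_content; infer_instance

-- ===== CLAIM (what is proved, stated in full; the proofs are below) =====
def Claim_equal_escape_csv_content : Prop := ∀ (content : String), Dom_escape_csv_content content → Spec_escape_csv_content content (escape_csv_content content)

-- ===== LEMMAS AND PROOFS =====

/-- Quote-doubling on the character list (the common value of A's replace and B's buffer). -/
def escChars : List Char → List Char
  | [] => []
  | c :: t => if c = '"' then '"' :: '"' :: escChars t else c :: escChars t

/-- Whether any special character occurs (the common value of A's any() and B's flag). -/
def needsChars (cs : List Char) : Bool :=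
  cs.any (fun c => c = ',' || c = '"' || c = '\n' || c = '\r')

lemma replace_go_eq (l : List Char) : ∀ (fuel : Nat) (acc : List Char), l.length ≤ fuel →
    PySem.Chars.replace.go ['"'] ['"', '"'] fuel l acc = acc.reverse ++ escChars l := by
  induction l with
  | nil =>
    intro fuel acc _
    cases fuel <;> simp [PySem.Chars.replace.go, escChars]
  | cons c t ih =>
    intro fuel acc h
    cases fuel with
    | zero => simp at h
    | succ f =>
      by_cases hc : c = '"'
      · subst hc
        rw [show PySem.Chars.replace.go ['"'] ['"', '"'] (f + 1) ('"' :: t) acc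
              = PySem.Chars.replace.go ['"'] ['"', '"'] f t ('"' :: '"' :: acc) from by
            simp [PySem.Chars.replace.go, List.isPrefixOf]]
        rw [ih f _ (by simp at h; omega)]
        simp [escChars]
      · rw [show PySem.Chars.replace.go ['"'] ['"', '"'] (f + 1) (c :: t) acc
              = PySem.Chars.replace.go ['"'] ['"', '"'] f t (c :: acc) from by
            simp [PySem.Chars.replace.go, List.isPrefixOf, Ne.symm hc]]
        rw [ih f _ (by simp at h; omega)]
        simp [escChars, hc]

lemma replace_eq (cs : List Char) :
    PySem.Chars.replace cs ['"'] ['"', '"'] = escChars cs := by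
  rw [PySem.Chars.replace, if_neg (by simp)]
  simpa using replace_go_eq cs cs.length [] le_rfl

lemma needsA_eq (s : String) :
    (([",", "\"", "\n", "\r"] : List String).any (fun ch => PySem.Str.isIn ch s)) =
    needsChars s.toList := by
  rw [Bool.eq_iff_iff]
  simp only [needsChars, List.any_eq_true, List.mem_cons,
    PySem.Str.isIn_iff_infix]
  constructor
  · rintro ⟨ch, hch, hin⟩
    have h4 : ch = "," ∨ ch = "\"" ∨ ch = "\n" ∨ ch = "\r" := by simpa using hch
    rcases h4 with rfl | rfl | rfl | rfl
    · exact ⟨',', (List.singleton_infix_iff _ _).1 hin, by simp⟩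
    · exact ⟨'"', (List.singleton_infix_iff _ _).1 hin, by simp⟩
    · exact ⟨'\n', (List.singleton_infix_iff _ _).1 hin, by simp⟩
    · exact ⟨'\r', (List.singleton_infix_iff _ _).1 hin, by simp⟩
  · rintro ⟨c, hc, hspec⟩
    simp only [Bool.or_eq_true, decide_eq_true_eq] at hspec
    have h4 : c = ',' ∨ c = '\"' ∨ c = '\n' ∨ c = '\r' := by tauto
    rcases h4 with rfl | rfl | rfl | rfl
    · exact ⟨",", by simp, (List.singleton_infix_iff _ _).2 hc⟩
    · exact ⟨"\"", by simp, (List.singleton_infix_iff _ _).2 hc⟩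
    · exact ⟨"\n", by simp, (List.singleton_infix_iff _ _).2 hc⟩
    · exact ⟨"\r", by simp, (List.singleton_infix_iff _ _).2 hc⟩

lemma foldl_esc (cs : List Char) : ∀ (buf : List Char) (flag : Bool),
    cs.foldl
      (fun (acc : List Char × Bool) ch =>
        if ch = '"' then (acc.1 ++ ['"', '"'], true)
        else (acc.1 ++ [ch], acc.2 || (ch = ',' || ch = '\n' || ch = '\r')))
      (buf, flag) = (buf ++ escChars cs, flag || needsChars cs) := by
  induction cs with
  | nil => intro buf flag; simp [escChars, needsChars]
  | cons c t ih =>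
    intro buf flag
    by_cases hc : c = '"'
    · subst hc
      simp only [List.foldl_cons, if_true, ih]
      simp [escChars, needsChars]
    · simp only [List.foldl_cons, if_neg hc, ih]
      cases flag <;> simp [escChars, needsChars, hc, Bool.or_assoc]

lemma main_eq (content : String) :
    escape_csv_content content = escape_csv_content_alt content := by
  unfold escape_csv_content escape_csv_content_alt
  rw [needsA_eq, foldl_esc]
  simp only [Bool.false_or]
  by_cases h : needsChars content.toList
  · rw [if_pos h, if_pos h]
    congr 1
    have : (PySem.Str.replace content "\"" "\"\"").toList
        = PySem.Chars.replace content.toList [ '"' ] ['"', '"'] := by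
      simpa using PySem.Str.toList_replace content "\"" "\"\""
    rw [this, replace_eq]
    simp
  · rw [if_neg (by simpa using h), if_neg (by simpa using h)]

-- ===== VERDICT (by name: the statement is the Claim_ definition above) =====
theorem escape_csv_content_spec : Claim_equal_escape_csv_content := by
  intro content _
  unfold Spec_escape_csv_content
  exact main_eq content
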